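-- pv_equiv track=rewrite | github.com/MrBrantCode/unitest_baseline | mut_generate/mist_train_cf/cf_21264/solution.py | adjust_list1
-- ===== SOURCE A (Python) =====
-- def adjust_list1(list_1, list_2):
--     """
--     Adjusts list_1 based on the values in list_2.
--
--     Args:
--     list_1 (list): The list to be adjusted.
--     list_2 (list): The list used for adjustment.
--
--     Returns:
--     list: The adjusted list_1.
--     """
--     target_sum = sum(list_2) // 2
--     current_sum = 0
--     adjusted_list1 = list_1[:len(list_2) // 2]  # Ensure list_1 has half the length of list_2
--
--     for i in range(len(adjusted_list1)):
--         adjusted_list1[i] = list_2[i]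
--         current_sum += list_2[i]
--         if current_sum > target_sum:
--             break
--
--     # Adjust the last element of list_1 if necessary
--     if current_sum != target_sum:
--         diff = current_sum - target_sum
--         adjusted_list1[-1] -= diff
--
--     return adjusted_list1
-- ===== SOURCE B (Python) =====
-- def adjust_list1(list_1, list_2):
--     k = min(len(list_1), len(list_2) // 2)
--     target = sum(list_2) // 2
--     cums, s = [], 0
--     for v in list_2[:k]:
--         s += v
--         cums.append(s)
--     bi = next((i for i, c in enumerate(cums) if c > target), k - 1)
--     current = cums[bi] if k else 0
--     result = list_2[:bi + 1] + list_1[bi + 1:k]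
--     if current != target:
--         result[-1] -= current - target
--     return result
-- ===== Notes on version B (the rewrite author's own statement) =====
-- stated objective: alternative
-- what changed: B replaces A's in-place overwrite-with-break loop by computing the prefix sums of list_2[:k] once, locating the first index whose running sum exceeds the target, and assembling the result by slice concatenation list_2[:bi+1] + list_1[bi+1:k] before the same final adjustment.
import Mathlib
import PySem

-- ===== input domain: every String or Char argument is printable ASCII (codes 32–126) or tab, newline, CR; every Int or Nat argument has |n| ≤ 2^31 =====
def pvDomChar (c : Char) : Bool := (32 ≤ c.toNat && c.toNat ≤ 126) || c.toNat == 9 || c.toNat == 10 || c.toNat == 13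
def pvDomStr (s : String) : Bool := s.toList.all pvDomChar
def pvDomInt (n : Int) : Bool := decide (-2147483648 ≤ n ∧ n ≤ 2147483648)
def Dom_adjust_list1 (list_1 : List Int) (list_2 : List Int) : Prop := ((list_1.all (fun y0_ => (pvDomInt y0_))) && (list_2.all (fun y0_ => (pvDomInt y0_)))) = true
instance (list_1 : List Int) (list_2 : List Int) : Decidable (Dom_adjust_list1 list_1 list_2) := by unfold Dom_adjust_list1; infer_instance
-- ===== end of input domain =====

-- B recomputes A's overwrite loop as prefix sums + a first-exceeding-index search + slice
-- concatenation (objective: alternative decomposition, same cost).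

-- ===== PORT A =====
-- for i in range(len(adjusted_list1)): … with break — structural recursion on the remaining count
def adjLoopA (list_2 : List Int) (target : Int) : Nat → Nat → List Int → Int → List Int × Int
  | 0, _, adj, cs => (adj, cs)
  | fuel+1, i, adj, cs =>
    -- list_2[i]; i < len(list_2) whenever this branch is reached, so the default is never used
    let v := (PySem.List.pyGet? list_2 (i : Int)).getD 0
    let adj' := adj.set i v
    let cs' := cs + v
    if cs' > target then (adj', cs') else adjLoopA list_2 target fuel (i+1) adj' cs'

def adjust_list1 (list_1 : List Int) (list_2 : List Int) : List Int :=
  let target := PySem.Int.floordiv list_2.sum 2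
  let adjusted := list_1.take (list_2.length / 2)  -- list_1[:len(list_2)//2] (nonneg bound: take is exact)
  let r := adjLoopA list_2 target adjusted.length 0 adjusted 0
  if r.2 ≠ target then
    -- adjusted_list1[-1] -= diff; IndexError on the empty list (excluded by Pre_)
    if h : r.1 = [] then [] else r.1.dropLast ++ [r.1.getLast h - (r.2 - target)]
  else r.1

-- ===== PORT B =====
-- the cums-building loop of Source B
def cumsB : List Int → Int → List Int
  | [], _ => []
  | v :: vs, s => (s + v) :: cumsB vs (s + v)

def adjust_list1_alt (list_1 : List Int) (list_2 : List Int) : List Int :=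
  let k := min list_1.length (list_2.length / 2)
  let target := PySem.Int.floordiv list_2.sum 2
  let cums := cumsB (list_2.take k) 0
  -- bi = next((i for i, c in enumerate(cums) if c > target), k - 1)
  let bi : Int := ((cums.findIdx? (fun c => c > target)).map (fun i => (i : Int))).getD ((k : Int) - 1)
  -- cums[bi] if k else 0; for k ≠ 0, 0 ≤ bi < k so the index is in range and the default unused
  let current : Int := if k ≠ 0 then (PySem.List.pyGet? cums bi).getD 0 else 0
  let result := PySem.List.slice list_2 none (some (bi + 1)) ++ PySem.List.slice list_1 (some (bi + 1)) (some (k : Int))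
  if current ≠ target then
    -- result[-1] -= current - target; IndexError on the empty list (excluded by Pre_)
    if h : result = [] then [] else result.dropLast ++ [result.getLast h - (current - target)]
  else result

-- ===== PRECONDITION & SPEC =====
-- Pre_ excludes exactly the inputs where A raises IndexError: the truncated prefix is empty
-- while the half-sum target is nonzero (adjusted_list1[-1] on an empty list).
def Pre_adjust_list1 (list_1 : List Int) (list_2 : List Int) : Prop :=
  min list_1.length (list_2.length / 2) ≠ 0 ∨ PySem.Int.floordiv list_2.sum 2 = 0
instance (list_1 : List Int) (list_2 : List Int) : Decidable (Pre_adjust_list1 list_1 list_2) := by unfold Pre_adjust_list1; infer_instance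

def pvWitness_adjust_list1 : List Int × List Int := ([1, 2, 3], [1, 2, 3, 4])

def Spec_adjust_list1 (list_1 : List Int) (list_2 : List Int) (out : List Int) : Prop := out = adjust_list1_alt list_1 list_2
instance (list_1 : List Int) (list_2 : List Int) (out : List Int) : Decidable (Spec_adjust_list1 list_1 list_2 out) := by unfold Spec_adjust_list1; infer_instance

-- ===== CLAIM (what is proved, stated in full; the proofs are below) =====
def Claim_equal_adjust_list1 : Prop := ∀ (list_1 : List Int) (list_2 : List Int), Dom_adjust_list1 list_1 list_2 → Pre_adjust_list1 list_1 list_2 → Spec_adjust_list1 list_1 list_2 (adjust_list1 list_1 list_2)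

-- ===== LEMMAS AND PROOFS =====
def loopS (target : Int) : List Int → List Int → Int → Nat → List Int × Int
  | [], adj, cs, _ => (adj, cs)
  | v :: vs, adj, cs, i =>
    if cs + v > target then (adj.set i v, cs + v) else loopS target vs (adj.set i v) (cs + v) (i+1)

def writeSeq : List Int → Nat → List Int → List Int
  | adj, _, [] => adj
  | adj, i, w :: ws => writeSeq (adj.set i w) (i+1) ws

def bIdx (target : Int) (vs : List Int) (cs : Int) : Nat :=
  ((cumsB vs cs).findIdx? (fun c => c > target)).getD (vs.length - 1)

theorem cumsB_length (vs : List Int) (s : Int) : (cumsB vs s).length = vs.length := by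
  induction vs generalizing s with
  | nil => rfl
  | cons v vs ih => simp [cumsB, ih]

theorem bIdx_lt (target : Int) (vs : List Int) (cs : Int) (h : vs ≠ []) :
    bIdx target vs cs < vs.length := by
  unfold bIdx
  cases hfi : (cumsB vs cs).findIdx? (fun c => c > target) with
  | none =>
    simp only [Option.getD_none]
    have : vs.length ≠ 0 := by simpa [List.length_eq_zero_iff] using h
    omega
  | some j =>
    have := List.findIdx?_eq_some_iff_findIdx_eq.mp hfi
    rw [cumsB_length] at this
    simpa using this.1

theorem bridge (l2 : List Int) (target : Int) :
    ∀ (fuel i : Nat) (adj : List Int) (cs : Int), i + fuel ≤ l2.length →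
    adjLoopA l2 target fuel i adj cs = loopS target ((l2.drop i).take fuel) adj cs i := by
  intro fuel
  induction fuel with
  | zero => intro i adj cs _; simp [adjLoopA, loopS]
  | succ fuel ih =>
    intro i adj cs hle
    have hi : i < l2.length := by omega
    rw [List.drop_eq_getElem_cons hi]
    show (let v := (PySem.List.pyGet? l2 (i : Int)).getD 0;
          if cs + v > target then (adj.set i v, cs + v)
          else adjLoopA l2 target fuel (i+1) (adj.set i v) (cs + v)) = _
    rw [PySem.List.pyGet?_natCast]
    simp only [List.take_succ_cons, loopS, List.getElem?_eq_getElem hi, Option.getD_some]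
    split
    · rfl
    · rw [ih (i+1) _ _ (by omega)]

theorem structChar (target : Int) :
    ∀ (vs adj : List Int) (cs : Int) (i : Nat),
    loopS target vs adj cs i =
      (writeSeq adj i (vs.take (bIdx target vs cs + 1)), (cumsB vs cs).getD (bIdx target vs cs) cs) := by
  intro vs
  induction vs with
  | nil => intro adj cs i; simp [loopS, writeSeq, bIdx, cumsB]
  | cons v vs ih =>
    intro adj cs i
    by_cases hb : cs + v > target
    · simp [loopS, hb, bIdx, cumsB, List.findIdx?_cons, writeSeq]
    · have hp : (decide (cs + v > target)) = false := decide_eq_false hb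
      cases hvs : vs with
      | nil => simp [loopS, hb, bIdx, cumsB, List.findIdx?_cons, writeSeq]
      | cons w ws =>
        rw [← hvs]
        have hvne : vs ≠ [] := by rw [hvs]; simp
        have hstep : bIdx target (v :: vs) cs = bIdx target vs (cs + v) + 1 := by
          unfold bIdx
          rw [show cumsB (v :: vs) cs = (cs + v) :: cumsB vs (cs + v) from rfl,
              List.findIdx?_cons, hp]
          simp only [Bool.false_eq_true, if_false]
          cases hfi : (cumsB vs (cs + v)).findIdx? (fun c => c > target) with
          | none =>
            simp
            have : vs.length ≠ 0 := by simpa [List.length_eq_zero_iff] using hvne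
            omega
          | some j => simp
        have hlt : bIdx target vs (cs + v) < (cumsB vs (cs + v)).length := by
          rw [cumsB_length]; exact bIdx_lt target vs (cs + v) hvne
        rw [show loopS target (v :: vs) adj cs i = loopS target vs (adj.set i v) (cs + v) (i + 1) by
          simp [loopS, hb]]
        rw [ih, hstep]
        refine Prod.ext ?_ ?_
        · show writeSeq (adj.set i v) (i + 1) _ =
            (writeSeq adj i (List.take (bIdx target vs (cs + v) + 1 + 1) (v :: vs)), _).1
          rw [List.take_succ_cons]
          rfl
        · show _ = ((cs + v) :: cumsB vs (cs + v)).getD (bIdx target vs (cs + v) + 1) cs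
          rw [List.getD_cons_succ, List.getD_eq_getElem _ _ hlt, List.getD_eq_getElem _ _ hlt]

theorem set_take_succ (l : List Int) (i : Nat) (w : Int) (h : i < l.length) :
    (l.set i w).take (i + 1) = l.take i ++ [w] := by
  rw [List.set_eq_take_cons_drop w h, List.take_append]
  have h1 : (l.take i).length = i := by simp; omega
  rw [List.take_take, h1]
  simp

theorem writeSeq_eq : ∀ (ws adj : List Int) (i : Nat), i + ws.length ≤ adj.length →
    writeSeq adj i ws = adj.take i ++ ws ++ adj.drop (i + ws.length) := by
  intro ws
  induction ws with
  | nil => intro adj i h; simp [writeSeq]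
  | cons w ws ih =>
    intro adj i h
    have hi : i < adj.length := by simp at h; omega
    show writeSeq (adj.set i w) (i + 1) ws = _
    rw [ih _ _ (by simp at h ⊢; omega)]
    rw [set_take_succ _ _ _ hi, List.drop_set_of_lt (by omega)]
    simp at h ⊢
    rw [show i + 1 + ws.length = i + (ws.length + 1) by omega]


theorem adjust_eq : ∀ (l1 l2 : List Int), Pre_adjust_list1 l1 l2 →
    adjust_list1 l1 l2 = adjust_list1_alt l1 l2 := by
  intro l1 l2 hpre
  unfold Pre_adjust_list1 at hpre
  simp only [adjust_list1, adjust_list1_alt]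
  set target := PySem.Int.floordiv l2.sum 2 with htarget
  set h2 := l2.length / 2 with hh2def
  set k := min l1.length h2 with hkdef
  have hk2 : k ≤ l2.length := le_trans (min_le_right _ _) (Nat.div_le_self _ _)
  by_cases hk : k = 0
  · -- empty prefix: Pre_ forces target = 0, both sides return []
    have htgt0 : target = 0 := by
      rcases hpre with h | h
      · exact absurd hk h
      · exact h
    have hadj : l1.take h2 = [] := by
      have h0 : (l1.take h2).length = 0 := by rw [List.length_take]; omega
      exact List.eq_nil_of_length_eq_zero h0
    rw [hadj, hk, htgt0]
    norm_num [adjLoopA, cumsB, PySem.List.slice_to]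
  · -- nonempty prefix
    set vs := l2.take k with hvsdef
    set cums := cumsB vs 0 with hcumsdef
    set b := bIdx target vs 0 with hbdef
    have hvs_len : vs.length = k := by rw [hvsdef, List.length_take]; omega
    have hvne : vs ≠ [] := by
      intro h; rw [h] at hvs_len; simp at hvs_len; omega
    have hbk : b < k := hvs_len ▸ bIdx_lt target vs 0 hvne
    have hlenadj : (l1.take h2).length = k := by rw [List.length_take]; omega
    have hcums_len : cums.length = k := by rw [hcumsdef, cumsB_length, hvs_len]
    have hws_len : (l2.take (b+1)).length = b + 1 := by rw [List.length_take]; omega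
    have hA : adjLoopA l2 target (l1.take h2).length 0 (l1.take h2) 0
        = (l2.take (b+1) ++ (l1.take h2).drop (b+1), cums.getD b 0) := by
      rw [hlenadj, bridge l2 target k 0 _ 0 (by omega), List.drop_zero, structChar]
      rw [← hvsdef, ← hbdef, ← hcumsdef]
      congr 1
      rw [show vs.take (b+1) = l2.take (b+1) by
        rw [hvsdef, List.take_take, Nat.min_eq_left (by omega)]]
      rw [writeSeq_eq _ _ 0 (by rw [hws_len, hlenadj]; omega)]
      rw [hws_len]
      simp
    rw [hA]
    have hbi : ((cums.findIdx? (fun c => c > target)).map (fun i => (i : Int))).getD ((k : Int) - 1)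
        = ((b : Nat) : Int) := by
      rw [hbdef]; unfold bIdx
      rw [← hcumsdef]
      cases hfi : cums.findIdx? (fun c => c > target) with
      | none =>
        simp
        rw [hvs_len]
        have hk1 : 1 ≤ k := by omega
        push_cast [hk1]
        omega
      | some j => simp
    rw [hbi]
    have hcur : (if k ≠ 0 then (PySem.List.pyGet? cums ((b : Nat) : Int)).getD 0 else 0)
        = cums.getD b 0 := by
      rw [if_pos hk, PySem.List.pyGet?_natCast,
          List.getElem?_eq_getElem (by omega), Option.getD_some,
          List.getD_eq_getElem _ _ (by omega)]
    rw [hcur]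
    have hcast : ((b : Nat) : Int) + 1 = (((b + 1 : Nat)) : Int) := by push_cast; ring
    rw [hcast, PySem.List.slice_to_natCast, PySem.List.slice_natCast]
    have hdrop : (l1.take h2).drop (b+1) = (l1.drop (b+1)).take (k - (b+1)) := by
      rw [List.drop_take]
      by_cases hle : h2 ≤ l1.length
      · rw [show k = h2 from by omega]
      · rw [List.take_of_length_le (by rw [List.length_drop]; omega),
            List.take_of_length_le (by rw [List.length_drop]; omega)]
    rw [hdrop]

-- ===== VERDICT (by name: the statement is the Claim_ definition above) =====
theorem adjust_list1_spec : Claim_equal_adjust_list1 := by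
  intro l1 l2 _ hpre
  show adjust_list1 l1 l2 = adjust_list1_alt l1 l2
  exact adjust_eq l1 l2 hpre
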